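-- pv_equiv track=rewrite | github.com/Travis-coder712/aures-db | pipeline/generators/generate_developer_quality.py | fuzzy_match_project
-- ===== SOURCE A (Python) =====
-- def fuzzy_match_project(name, projects):
--     """Try to find a project by name (case-insensitive, partial)."""
--     name_lower = name.lower().strip()
--     # Exact id match
--     slug_attempt = name_lower.replace(' ', '-').replace("'", '')
--     if slug_attempt in projects:
--         return slug_attempt
--
--     # Name match
--     for pid, p in projects.items():
--         if p.get('name', '').lower() == name_lower:
--             return pid
--
--     # Partial match
--     for pid, p in projects.items():
--         pname = p.get('name', '').lower()
--         # Check if project name starts with the search name or vice versa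
--         if name_lower in pname or pname in name_lower:
--             return pid
--
--     return None
-- ===== SOURCE B (Python) =====
-- def fuzzy_match_project(name, projects):
--     """Try to find a project by name: rank every project and take the best-ranked one."""
--     name_lower = name.lower().strip()
--     slug_attempt = name_lower.replace(' ', '-').replace("'", '')
--     if slug_attempt in projects:
--         return slug_attempt
--
--     def score(p):
--         pname = p.get('name', '').lower()
--         if pname == name_lower:
--             return 0
--         if name_lower in pname or pname in name_lower:
--             return 1
--         return 2
--
--     best = min(projects.items(), key=lambda item: score(item[1]), default=None)
--     if best is not None and score(best[1]) < 2:
--         return best[0]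
--     return None
-- ===== Notes on version B (the rewrite author's own statement) =====
-- stated objective: alternative
-- what changed: A's staged scans (exact-name pass, then partial pass) are replaced by ranking each project with a numeric score (0 exact, 1 partial, 2 none) and taking the single min by score; Python's min returns the first minimal element, which preserves A's exact-over-partial priority and first-match-wins.
import Mathlib
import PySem

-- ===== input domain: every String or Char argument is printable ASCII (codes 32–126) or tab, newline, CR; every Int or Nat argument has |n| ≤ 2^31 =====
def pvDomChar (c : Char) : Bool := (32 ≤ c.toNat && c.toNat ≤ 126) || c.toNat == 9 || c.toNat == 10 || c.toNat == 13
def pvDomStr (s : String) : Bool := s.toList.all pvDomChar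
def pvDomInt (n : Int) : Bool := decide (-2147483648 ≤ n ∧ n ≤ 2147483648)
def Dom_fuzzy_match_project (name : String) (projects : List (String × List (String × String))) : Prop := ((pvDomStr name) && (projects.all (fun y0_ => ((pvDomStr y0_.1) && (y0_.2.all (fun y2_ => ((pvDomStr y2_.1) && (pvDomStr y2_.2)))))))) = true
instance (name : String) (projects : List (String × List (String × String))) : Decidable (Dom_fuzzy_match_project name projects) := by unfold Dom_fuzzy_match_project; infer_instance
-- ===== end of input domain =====

-- B replaces A's staged scans (exact pass, then partial pass) by ranking every project with a
-- numeric score (0 exact, 1 partial, 2 none) and taking the first minimum by score (alternative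
-- algorithm, same cost).

-- shared helper: p.get('name', '') on an association list (first match, Python dict lookup)
def pvGetName (p : List (String × String)) : String :=
  match p.find? (fun kv => kv.1 == "name") with
  | some kv => kv.2
  | none => ""

-- ===== PORT A =====
def fuzzy_match_project (name : String) (projects : List (String × List (String × String))) : Option String :=
  let name_lower := PySem.Str.strip (PySem.Str.lower name)
  let slug_attempt := PySem.Str.replace (PySem.Str.replace name_lower " " "-") "'" ""
  if projects.any (fun kv => kv.1 == slug_attempt) then some slug_attempt
  else
    -- Name match loop: first pid whose name equals name_lower
    match projects.findSome? (fun kv =>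
        if PySem.Str.lower (pvGetName kv.2) == name_lower then some kv.1 else none) with
    | some pid => some pid
    | none =>
      -- Partial match loop
      projects.findSome? (fun kv =>
        if PySem.Str.isIn name_lower (PySem.Str.lower (pvGetName kv.2))
           || PySem.Str.isIn (PySem.Str.lower (pvGetName kv.2)) name_lower
        then some kv.1 else none)

-- ===== PORT B =====
-- rank of one project dict: 0 = exact name match, 1 = partial match, 2 = no match
def pvScore (name_lower : String) (p : List (String × String)) : Nat :=
  if PySem.Str.lower (pvGetName p) == name_lower then 0
  else if PySem.Str.isIn name_lower (PySem.Str.lower (pvGetName p))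
          || PySem.Str.isIn (PySem.Str.lower (pvGetName p)) name_lower then 1
  else 2

def fuzzy_match_project_alt (name : String) (projects : List (String × List (String × String))) : Option String :=
  let name_lower := PySem.Str.strip (PySem.Str.lower name)
  let slug_attempt := PySem.Str.replace (PySem.Str.replace name_lower " " "-") "'" ""
  if projects.any (fun kv => kv.1 == slug_attempt) then some slug_attempt
  else
    match PySem.List.min? projects (fun kv => pvScore name_lower kv.2) with
    | some best => if pvScore name_lower best.2 < 2 then some best.1 else none
    | none => none

-- ===== PRECONDITION & SPEC =====
def Spec_fuzzy_match_project (name : String) (projects : List (String × List (String × String))) (out : Option String) : Prop := out = fuzzy_match_project_alt name projects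
instance (name : String) (projects : List (String × List (String × String))) (out : Option String) : Decidable (Spec_fuzzy_match_project name projects out) := by unfold Spec_fuzzy_match_project; infer_instance

-- ===== CLAIM (what is proved, stated in full; the proofs are below) =====
def Claim_equal_fuzzy_match_project : Prop := ∀ (name : String) (projects : List (String × List (String × String))), Dom_fuzzy_match_project name projects → Spec_fuzzy_match_project name projects (fuzzy_match_project name projects)

-- ===== LEMMAS AND PROOFS =====

/-- the result of folding the running-min step from `some m` over `t`, for a 3-valued key. -/
def pvRes {α : Type} (key : α → Nat) (m : α) (t : List α) : α :=
  if key m = 0 then m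
  else match t.find? (fun x => key x == 0) with
  | some x => x
  | none =>
    if key m = 1 then m
    else match t.find? (fun x => key x == 1) with
    | some x => x
    | none => m

theorem pv_fold_min {α : Type} (key : α → Nat) (hk : ∀ x, key x ≤ 2) (t : List α) (m : α) :
    t.foldl (fun acc x =>
      match acc with
      | none => some x
      | some m' => if key x < key m' then some x else some m') (some m)
    = some (pvRes key m t) := by
  induction t generalizing m with
  | nil => simp [pvRes]
  | cons x t ih =>
    simp only [List.foldl_cons]
    by_cases hx : key x < key m
    · simp only [if_pos hx, ih]
      have hm2 := hk m; have hx2 := hk x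
      unfold pvRes
      interval_cases h1 : key m <;> interval_cases h2 : key x <;>
        simp_all [List.find?]
    · simp only [if_neg hx, ih]
      have hm2 := hk m; have hx2 := hk x
      unfold pvRes
      interval_cases h1 : key m <;> interval_cases h2 : key x <;>
        simp_all [List.find?]
  
theorem pv_findSome?_if {α β : Type} (p : α → Bool) (g : α → β) (l : List α) :
    l.findSome? (fun x => if p x then some (g x) else none) = (l.find? p).map g := by
  induction l with
  | nil => rfl
  | cons h t ih => by_cases hp : p h <;> simp [List.find?_cons, hp, ih]

theorem pv_find?_or_none {α : Type} (p q : α → Bool) (l : List α) (h : l.find? p = none) :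
    l.find? (fun x => p x || q x) = l.find? q := by
  induction l with
  | nil => rfl
  | cons x t ih =>
    rw [List.find?_cons] at h
    by_cases hp : p x
    · simp [hp] at h
    · have h' : t.find? p = none := by simpa [List.find?_cons, hp] using h
      simp [List.find?_cons, hp, ih h']

theorem pv_min?_cons {α : Type} (key : α → Nat) (hk : ∀ x, key x ≤ 2) (h : α) (t : List α) :
    PySem.List.min? (h :: t) key = some (pvRes key h t) := by
  have := pv_fold_min key hk t h
  simpa [PySem.List.min?] using this

theorem pv_main {α β : Type} (key : α → Nat) (g : α → β) (hk : ∀ x, key x ≤ 2) (l : List α) :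
    (match (l.find? (fun x => key x == 0)).map g with
     | some y => some y
     | none => (l.find? (fun x => (key x == 0) || (key x == 1))).map g)
    = (match PySem.List.min? l key with
       | some best => if key best < 2 then some (g best) else none
       | none => none) := by
  cases l with
  | nil => rfl
  | cons h t =>
    rw [pv_min?_cons key hk h t]
    have hh := hk h
    by_cases h0 : key h = 0
    · simp [pvRes, h0]
    · by_cases h1 : key h = 1
      · cases hf0 : t.find? (fun x => key x == 0) with
        | some x =>
          have hx0 : key x = 0 := by simpa using List.find?_some hf0
          simp [pvRes, h0, h1, hf0, hx0]
        | none => simp [List.find?_cons, pvRes, h0, h1, hf0]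
      · have h2 : key h = 2 := by omega
        cases hf0 : t.find? (fun x => key x == 0) with
        | some x =>
          have hx0 : key x = 0 := by simpa using List.find?_some hf0
          simp [pvRes, h0, hf0, hx0]
        | none =>
          have hor := pv_find?_or_none (fun x => key x == 0) (fun x => key x == 1) t hf0
          cases hf1 : t.find? (fun x => key x == 1) with
          | some x =>
            have hx1 : key x = 1 := by simpa using List.find?_some hf1
            simp [pvRes, h0, h2, hf0, hf1, hor, hx1]
          | none =>
            simp [pvRes, h0, h2, hf0, hf1, hor]

theorem pv_score_le_two (nl : String) (p : List (String × String)) : pvScore nl p ≤ 2 := by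
  unfold pvScore; split_ifs <;> simp

theorem pv_chars_isIn_refl (l : List Char) : PySem.Chars.isIn l l = true := by
  have := (PySem.Str.isIn_iff_infix (String.ofList l) (String.ofList l)).mpr (List.infix_refl _)
  simpa [PySem.Str.isIn, String.toList_ofList] using this

theorem pv_exact_eq (nl : String) (p : List (String × String)) :
    (PySem.Str.lower (pvGetName p) == nl) = (pvScore nl p == 0) := by
  unfold pvScore
  split_ifs with h1 h2 <;> simp_all

theorem pv_part_eq (nl : String) (p : List (String × String)) :
    (PySem.Str.isIn nl (PySem.Str.lower (pvGetName p))
      || PySem.Str.isIn (PySem.Str.lower (pvGetName p)) nl)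
    = ((pvScore nl p == 0) || (pvScore nl p == 1)) := by
  unfold pvScore
  split_ifs with h1 h2
  · have hs : PySem.Str.lower (pvGetName p) = nl := by simpa using h1
    rw [hs]
    simp [PySem.Str.isIn, pv_chars_isIn_refl]
  · simp_all
  · simp_all

theorem fuzzy_match_project_eq_alt (name : String)
    (projects : List (String × List (String × String))) :
    fuzzy_match_project name projects = fuzzy_match_project_alt name projects := by
  unfold fuzzy_match_project fuzzy_match_project_alt
  simp only []
  generalize PySem.Str.strip (PySem.Str.lower name) = nl
  generalize PySem.Str.replace (PySem.Str.replace nl " " "-") "'" "" = slug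
  split_ifs with hslug
  · rfl
  · -- rewrite A's loops to find?-based form over the score
    rw [pv_findSome?_if, pv_findSome?_if]
    have he : (fun (kv : String × List (String × String)) =>
        PySem.Str.lower (pvGetName kv.2) == nl) = (fun kv => pvScore nl kv.2 == 0) :=
      funext fun kv => pv_exact_eq nl kv.2
    have hp : (fun (kv : String × List (String × String)) =>
        PySem.Str.isIn nl (PySem.Str.lower (pvGetName kv.2))
          || PySem.Str.isIn (PySem.Str.lower (pvGetName kv.2)) nl)
        = (fun kv => (pvScore nl kv.2 == 0) || (pvScore nl kv.2 == 1)) :=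
      funext fun kv => pv_part_eq nl kv.2
    rw [he, hp]
    have H := @pv_main (String × List (String × String)) String
      (fun kv => pvScore nl kv.2) Prod.fst (fun kv => pv_score_le_two nl kv.2) projects
    cases hfa : List.find? (fun kv => pvScore nl kv.2 == 0) projects <;>
      cases hmb : PySem.List.min? projects (fun kv => pvScore nl kv.2) <;>
        simp only [hfa, hmb, Option.map_some, Option.map_none] at H ⊢ <;>
          exact H

-- ===== VERDICT (by name: the statement is the Claim_ definition above) =====
theorem fuzzy_match_project_spec : Claim_equal_fuzzy_match_project := by
  intro name projects _
  unfold Spec_fuzzy_match_project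
  exact fuzzy_match_project_eq_alt name projects
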